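-- pv_equiv track=rewrite | github.com/alvachen-git/tradingart | term_structure_service.py | _filter_contracts_by_coverage
-- ===== SOURCE A (Python) =====
-- from typing import Any, Dict, List, Optional, Sequence, Tuple
--
-- def _filter_contracts_by_coverage(
--     selected_contracts: Sequence[str],
--     date_map: Dict[str, Dict[str, Dict[str, Optional[float]]]],
--     anchors: Sequence[Tuple[str, str]],
--     min_points: int = 2,
-- ) -> List[str]:
--     """
--     Keep contracts that have enough observed points across anchor dates.
--     Example: min_points=2 means single-point contracts are dropped.
--     """
--     if not selected_contracts:
--         return []
--     keep: List[str] = []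
--     for month in selected_contracts:
--         observed = 0
--         for _, date_key in anchors:
--             day_contract_map = date_map.get(date_key, {})
--             close_px = day_contract_map.get(month, {}).get("close_price")
--             if close_px is not None:
--                 observed += 1
--         if observed >= int(min_points):
--             keep.append(month)
--     return keep
-- ===== SOURCE B (Python) =====
-- from typing import Dict, List, Optional, Sequence, Tuple
--
--
-- def _filter_contracts_by_coverage(
--     selected_contracts: Sequence[str],
--     date_map: Dict[str, Dict[str, Dict[str, Optional[float]]]],
--     anchors: Sequence[Tuple[str, str]],
--     min_points: int = 2,
-- ) -> List[str]:
--     # Build a coverage-count table date-major, then filter in one pass.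
--     months = set(selected_contracts)
--     counts: Dict[str, int] = {}
--     for _, date_key in anchors:
--         day_contract_map = date_map.get(date_key, {})
--         for m in months:
--             if day_contract_map.get(m, {}).get("close_price") is not None:
--                 counts[m] = counts.get(m, 0) + 1
--     need = int(min_points)
--     return [m for m in selected_contracts if counts.get(m, 0) >= need]
-- ===== Notes on version B (the rewrite author's own statement) =====
-- stated objective: faster
-- what changed: Replaces A's contract-major loop with its per-contract rescan of the anchors by a date-major pass that builds a coverage-count table once (hoisting the date_map lookup to once per anchor and counting each distinct contract once), followed by a single filtering pass over selected_contracts.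
import Mathlib
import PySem

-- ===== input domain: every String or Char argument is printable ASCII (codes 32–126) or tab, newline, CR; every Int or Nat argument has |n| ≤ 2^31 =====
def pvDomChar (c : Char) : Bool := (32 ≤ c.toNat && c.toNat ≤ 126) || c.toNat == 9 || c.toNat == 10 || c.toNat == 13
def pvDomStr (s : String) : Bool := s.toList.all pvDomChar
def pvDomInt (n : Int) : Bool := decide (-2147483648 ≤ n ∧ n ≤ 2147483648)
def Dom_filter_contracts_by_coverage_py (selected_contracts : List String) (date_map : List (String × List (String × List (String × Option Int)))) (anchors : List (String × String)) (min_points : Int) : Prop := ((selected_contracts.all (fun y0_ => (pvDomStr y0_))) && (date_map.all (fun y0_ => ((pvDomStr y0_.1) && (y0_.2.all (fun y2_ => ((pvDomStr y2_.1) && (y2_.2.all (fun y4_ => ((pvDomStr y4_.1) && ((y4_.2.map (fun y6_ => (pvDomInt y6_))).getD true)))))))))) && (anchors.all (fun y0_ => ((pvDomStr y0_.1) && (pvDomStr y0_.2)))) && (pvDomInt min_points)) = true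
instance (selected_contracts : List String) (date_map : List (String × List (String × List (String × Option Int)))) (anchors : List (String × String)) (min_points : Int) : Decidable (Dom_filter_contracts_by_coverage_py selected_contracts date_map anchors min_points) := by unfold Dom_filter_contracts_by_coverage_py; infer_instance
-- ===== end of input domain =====

-- B builds a coverage-count table in one date-major pass and then filters selected_contracts once,
-- instead of A's contract-major loop that rescans the anchors for every contract (objective: faster; a timing run measured B faster).

-- ===== PORT A =====
-- shared helper: the chained lookup 'date_map.get(date_key, {}).get(month, {}).get("close_price")',
-- written identically in both Pythons
def pvClosePx (date_map : List (String × List (String × List (String × Option Int)))) (date_key month : String) : Option Int :=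
  ((PySem.Dict.mk ((PySem.Dict.mk ((PySem.Dict.mk date_map).getD date_key [])).getD month [])).get? "close_price").getD none

def filter_contracts_by_coverage_py (selected_contracts : List String) (date_map : List (String × List (String × List (String × Option Int)))) (anchors : List (String × String)) (min_points : Int) : List String :=
  if selected_contracts = [] then []
  else
    selected_contracts.foldl (fun keep month =>
      let observed : Int :=
        anchors.foldl (fun observed a =>
          if (pvClosePx date_map a.2 month).isSome then observed + 1 else observed) 0
      if min_points ≤ observed then keep ++ [month] else keep) []

-- ===== PORT B =====
def filter_contracts_by_coverage_py_alt (selected_contracts : List String) (date_map : List (String × List (String × List (String × Option Int)))) (anchors : List (String × String)) (min_points : Int) : List String :=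
  let months := PySem.Set.ofList selected_contracts
  let counts : PySem.Dict String Int :=
    anchors.foldl (fun counts a =>
      months.foldl (fun counts m =>
        if (pvClosePx date_map a.2 m).isSome then counts.modify m 0 (· + 1) else counts) counts)
      PySem.Dict.empty
  selected_contracts.filter (fun m => decide (min_points ≤ counts.getD m 0))

-- ===== PRECONDITION & SPEC =====
def Spec_filter_contracts_by_coverage_py (selected_contracts : List String) (date_map : List (String × List (String × List (String × Option Int)))) (anchors : List (String × String)) (min_points : Int) (out : List String) : Prop := out = filter_contracts_by_coverage_py_alt selected_contracts date_map anchors min_points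
instance (selected_contracts : List String) (date_map : List (String × List (String × List (String × Option Int)))) (anchors : List (String × String)) (min_points : Int) (out : List String) : Decidable (Spec_filter_contracts_by_coverage_py selected_contracts date_map anchors min_points out) := by unfold Spec_filter_contracts_by_coverage_py; infer_instance

-- ===== CLAIM (what is proved, stated in full; the proofs are below) =====
def Claim_equal_filter_contracts_by_coverage_py : Prop := ∀ (selected_contracts : List String) (date_map : List (String × List (String × List (String × Option Int)))) (anchors : List (String × String)) (min_points : Int), Dom_filter_contracts_by_coverage_py selected_contracts date_map anchors min_points → Spec_filter_contracts_by_coverage_py selected_contracts date_map anchors min_points (filter_contracts_by_coverage_py selected_contracts date_map anchors min_points)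

-- ===== LEMMAS AND PROOFS =====

-- A's inner loop counts the anchors satisfying the predicate
theorem pv_foldl_count {α : Type} (p : α → Bool) (l : List α) (i : Int) :
    l.foldl (fun obs a => if p a then obs + 1 else obs) i = i + (l.countP p : Int) := by
  induction l generalizing i with
  | nil => simp [List.countP_nil]
  | cons a l ih =>
    simp only [List.foldl_cons, List.countP_cons, ih]
    split_ifs <;> push_cast <;> omega

-- B's inner loop: one date's pass adds (count of x in ms) when the predicate holds at x
theorem pv_inner (p : String → Bool) (ms : List String) (d : PySem.Dict String Int) (x : String) :
    (ms.foldl (fun d m => if p m then d.modify m 0 (· + 1) else d) d).getD x 0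
      = d.getD x 0 + (if p x then (ms.count x : Int) else 0) := by
  induction ms generalizing d with
  | nil => simp
  | cons m ms ih =>
    simp only [List.foldl_cons, List.count_cons]
    by_cases hpm : p m
    · rw [if_pos hpm, ih, PySem.Dict.getD_modify]
      by_cases hx : x = m
      · subst hx; simp [hpm]; ring
      · simp [hx, Ne.symm hx]
    · rw [if_neg hpm, ih]
      by_cases hx : x = m
      · subst hx; simp [hpm]
      · simp [Ne.symm hx]

-- B's outer loop: the final table entry at x is (count of x in ms) * (anchors satisfying the predicate at x)
theorem pv_outer (p : String → String → Bool) (an : List (String × String)) (ms : List String)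
    (d : PySem.Dict String Int) (x : String) :
    (an.foldl (fun d a => ms.foldl (fun d m => if p a.2 m then d.modify m 0 (· + 1) else d) d) d).getD x 0
      = d.getD x 0 + (ms.count x : Int) * (an.countP (fun a => p a.2 x) : Int) := by
  induction an generalizing d with
  | nil => simp
  | cons a an ih =>
    simp only [List.foldl_cons, ih, pv_inner, List.countP_cons]
    split_ifs <;> push_cast <;> ring

-- ===== VERDICT (by name: the statement is the Claim_ definition above) =====
theorem filter_contracts_by_coverage_py_spec : Claim_equal_filter_contracts_by_coverage_py := by
  intro sc dm an mp _
  unfold Spec_filter_contracts_by_coverage_py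
  unfold filter_contracts_by_coverage_py filter_contracts_by_coverage_py_alt
  by_cases h : sc = []
  · simp [h]
  · simp only [h, if_false]
    rw [PySem.List.foldl_append_ite_eq_filter]
    simp only [List.nil_append]
    apply List.filter_congr
    intro x hx
    have hcount : (PySem.Set.ofList sc).count x = 1 :=
      List.count_eq_one_of_mem (PySem.Set.nodup_ofList sc) ((PySem.Set.mem_ofList sc x).mpr hx)
    rw [pv_foldl_count,
      pv_outer (fun dk m => (pvClosePx dm dk m).isSome) an (PySem.Set.ofList sc) PySem.Dict.empty x]
    simp [hcount, PySem.Dict.getD_empty]
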